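-- pv_equiv track=rewrite | github.com/Priyansh2/UltimateTicTacToeBot | TicTacToe.py | block_win
-- ===== SOURCE A (Python) =====
-- def block_win(player,game,base1,base2):
--     base1*=3
--     base2*=3
--     if game[base1+0][base2+0]==player and game[base1+1][base2+1]==player and game[base1+2][base2+2]==player:
--         return 1
--     if game[base1+0][base2+2]==player and game[base1+1][base2+1]==player and game[base1+2][base2+0]==player:
--         return 1
--     for i in range(0,3):
--         if game[base1+i][base2+0]==player and game[base1+i][base2+1]==player and game[base1+i][base2+2]==player:
--             return 1
--         if game[base1+0][base2+i]==player and game[base1+1][base2+i]==player and game[base1+2][base2+i]==player: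
--             return 1
--     return 0
-- ===== SOURCE B (Python) =====
-- # Winning lines encoded as 9-bit masks over cells (r,c) -> bit (8 - (3*r+c)).
-- WIN_MASKS = (0b111000000, 0b000111000, 0b000000111,
--              0b100100100, 0b010010010, 0b001001001,
--              0b100010001, 0b001010100)
--
-- def block_win(player, game, base1, base2):
--     base1 *= 3
--     base2 *= 3
--     mask = 0
--     for r in range(3):
--         row = game[base1 + r]
--         for c in range(3):
--             mask = (mask << 1) | (row[base2 + c] == player)
--     for w in WIN_MASKS:
--         if mask & w == w:
--             return 1
--     return 0
-- ===== Notes on version B (the rewrite author's own statement) =====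
-- stated objective: alternative
-- what changed: B encodes the sub-board as a 9-bit occupancy bitmask built in one pass and detects a win by bitwise AND against eight precomputed winning-line masks, instead of A's per-line chains of cell comparisons with early returns.
-- outside the precondition, e.g. on block_win('x', [['x'], ['o', 'x'], ['o', 'o', 'x']], 0, 0): A returns 1, B raises IndexError
import Mathlib
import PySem

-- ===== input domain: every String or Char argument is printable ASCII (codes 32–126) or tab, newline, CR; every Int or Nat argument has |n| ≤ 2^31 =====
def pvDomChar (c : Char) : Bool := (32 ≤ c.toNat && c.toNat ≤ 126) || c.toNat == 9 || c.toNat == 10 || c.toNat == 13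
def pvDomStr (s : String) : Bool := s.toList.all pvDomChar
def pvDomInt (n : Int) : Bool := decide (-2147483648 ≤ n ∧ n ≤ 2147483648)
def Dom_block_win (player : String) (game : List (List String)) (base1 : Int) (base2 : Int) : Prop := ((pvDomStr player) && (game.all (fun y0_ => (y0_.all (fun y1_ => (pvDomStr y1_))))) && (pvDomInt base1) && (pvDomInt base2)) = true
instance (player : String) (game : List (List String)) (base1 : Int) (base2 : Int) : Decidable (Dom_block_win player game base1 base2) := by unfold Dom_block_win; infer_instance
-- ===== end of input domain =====

-- B encodes the sub-board as a 9-bit occupancy bitmask built in one pass and tests it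
-- against eight precomputed winning-line masks (objective: alternative). Return value only.

-- game[i][j] as Python computes it (negative index from the end; none = IndexError); exact via PySem.List.pyGet?
def pyCell (game : List (List String)) (i j : Int) : Option String :=
  (PySem.List.pyGet? game i).bind (fun row => PySem.List.pyGet? row j)

-- ===== PORT A =====
-- the 'for i in range(0,3)' loop of A, as structural recursion over [0,1,2]
def blockLoopA (player : String) (game : List (List String)) (b1 b2 : Int) : List Int → Int
  | [] => 0
  | i :: rest =>
    if pyCell game (b1 + i) (b2 + 0) == some player && pyCell game (b1 + i) (b2 + 1) == some player && pyCell game (b1 + i) (b2 + 2) == some player then 1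
    else if pyCell game (b1 + 0) (b2 + i) == some player && pyCell game (b1 + 1) (b2 + i) == some player && pyCell game (b1 + 2) (b2 + i) == some player then 1
    else blockLoopA player game b1 b2 rest

def block_win (player : String) (game : List (List String)) (base1 : Int) (base2 : Int) : Int :=
  let b1 := base1 * 3
  let b2 := base2 * 3
  if pyCell game (b1 + 0) (b2 + 0) == some player && pyCell game (b1 + 1) (b2 + 1) == some player && pyCell game (b1 + 2) (b2 + 2) == some player then 1
  else if pyCell game (b1 + 0) (b2 + 2) == some player && pyCell game (b1 + 1) (b2 + 1) == some player && pyCell game (b1 + 2) (b2 + 0) == some player then 1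
  else blockLoopA player game b1 b2 [0, 1, 2]

-- ===== PORT B =====
-- the eight winning lines as 9-bit masks (cell (r,c) at bit 8-(3r+c)); the mask is a
-- nonnegative Python int, represented as Nat so that <<< ||| &&& are exact
def winMasks : List Nat := [448, 56, 7, 292, 146, 73, 273, 84]

def block_win_alt (player : String) (game : List (List String)) (base1 : Int) (base2 : Int) : Int :=
  let b1 := base1 * 3
  let b2 := base2 * 3
  let mask := ([0, 1, 2] : List Int).foldl (fun m r =>
    let row := (PySem.List.pyGet? game (b1 + r)).getD []
    ([0, 1, 2] : List Int).foldl (fun m c =>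
      (m <<< 1) ||| (if PySem.List.pyGet? row (b2 + c) == some player then 1 else 0)) m) 0
  if winMasks.any (fun w => mask &&& w == w) then 1 else 0

-- ===== PRECONDITION & SPEC =====
-- Pre_ excludes inputs where some of the nine cells of the sub-board is out of range (IndexError):
-- there A may still return 1 by an early-exit line checked before the bad cell, while B always
-- reads all nine cells and raises — A's short-circuit on such ragged boards is an artefact.
def Pre_block_win (player : String) (game : List (List String)) (base1 : Int) (base2 : Int) : Prop :=
  ∀ i ∈ ([0, 1, 2] : List Int), ∀ j ∈ ([0, 1, 2] : List Int),
    (pyCell game (base1 * 3 + i) (base2 * 3 + j)).isSome = true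
instance (player : String) (game : List (List String)) (base1 : Int) (base2 : Int) : Decidable (Pre_block_win player game base1 base2) := by unfold Pre_block_win; infer_instance

def pvWitness_block_win : String × List (List String) × Int × Int :=
  ("x", [["x", "o", "x"], ["o", "x", "o"], ["o", "o", "x"]], 0, 0)

def Spec_block_win (player : String) (game : List (List String)) (base1 : Int) (base2 : Int) (out : Int) : Prop := out = block_win_alt player game base1 base2
instance (player : String) (game : List (List String)) (base1 : Int) (base2 : Int) (out : Int) : Decidable (Spec_block_win player game base1 base2 out) := by unfold Spec_block_win; infer_instance

-- ===== CLAIM (what is proved, stated in full; the proofs are below) =====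
def Claim_equal_block_win : Prop := ∀ (player : String) (game : List (List String)) (base1 : Int) (base2 : Int), Dom_block_win player game base1 base2 → Pre_block_win player game base1 base2 → Spec_block_win player game base1 base2 (block_win player game base1 base2)

-- ===== LEMMAS AND PROOFS =====
-- the 9 cell tests as free Booleans: A's branch order equals B's mask tests
theorem key_bool : ∀ (a b c d e f g h i : Bool),
    (if a && e && i then (1 : Int) else
     if c && e && g then 1 else
     if a && b && c then 1 else
     if a && d && g then 1 else
     if d && e && f then 1 else
     if b && e && h then 1 else
     if g && h && i then 1 else
     if c && f && i then 1 else 0)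
    = (let bit := fun (x : Bool) => if x then (1 : Nat) else 0
       let mask := ((((((((((0 <<< 1) ||| bit a) <<< 1) ||| bit b) <<< 1 ||| bit c) <<< 1 ||| bit d)
         <<< 1 ||| bit e) <<< 1 ||| bit f) <<< 1 ||| bit g) <<< 1 ||| bit h) <<< 1 ||| bit i
       if winMasks.any (fun w => mask &&& w == w) then (1 : Int) else 0) := by decide

-- ===== VERDICT (by name: the statement is the Claim_ definition above) =====
theorem block_win_spec : Claim_equal_block_win := by
  intro player game base1 base2 _ hpre
  unfold Spec_block_win
  have hr0 := hpre 0 (by simp) 0 (by simp)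
  have hr1 := hpre 1 (by simp) 0 (by simp)
  have hr2 := hpre 2 (by simp) 0 (by simp)
  cases hg0 : PySem.List.pyGet? game (base1 * 3 + 0) with
  | none => rw [pyCell, hg0] at hr0; simp at hr0
  | some row0 =>
  cases hg1 : PySem.List.pyGet? game (base1 * 3 + 1) with
  | none => rw [pyCell, hg1] at hr1; simp at hr1
  | some row1 =>
  cases hg2 : PySem.List.pyGet? game (base1 * 3 + 2) with
  | none => rw [pyCell, hg2] at hr2; simp at hr2
  | some row2 =>
  have hc : ∀ i ∈ ([0,1,2] : List Int), ∀ j ∈ ([0,1,2] : List Int), ∀ row,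
      PySem.List.pyGet? game (base1 * 3 + i) = some row →
      ∃ v, PySem.List.pyGet? row (base2 * 3 + j) = some v := by
    intro i hi j hj row hrow
    have := hpre i hi j hj
    rw [pyCell, hrow] at this
    simpa [Option.isSome_iff_exists] using this
  obtain ⟨v00, h00⟩ := hc 0 (by simp) 0 (by simp) row0 hg0
  obtain ⟨v01, h01⟩ := hc 0 (by simp) 1 (by simp) row0 hg0
  obtain ⟨v02, h02⟩ := hc 0 (by simp) 2 (by simp) row0 hg0
  obtain ⟨v10, h10⟩ := hc 1 (by simp) 0 (by simp) row1 hg1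
  obtain ⟨v11, h11⟩ := hc 1 (by simp) 1 (by simp) row1 hg1
  obtain ⟨v12, h12⟩ := hc 1 (by simp) 2 (by simp) row1 hg1
  obtain ⟨v20, h20⟩ := hc 2 (by simp) 0 (by simp) row2 hg2
  obtain ⟨v21, h21⟩ := hc 2 (by simp) 1 (by simp) row2 hg2
  obtain ⟨v22, h22⟩ := hc 2 (by simp) 2 (by simp) row2 hg2
  simp only [add_zero] at hg0 h00 h10 h20
  simp only [block_win, block_win_alt, blockLoopA, pyCell,
    List.foldl_cons, List.foldl_nil, add_zero,
    hg0, hg1, hg2, Option.bind_some, Option.getD_some,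
    h00, h01, h02, h10, h11, h12, h20, h21, h22,
    Option.some_beq_some]
  exact key_bool (v00 == player) (v01 == player) (v02 == player)
    (v10 == player) (v11 == player) (v12 == player)
    (v20 == player) (v21 == player) (v22 == player)
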